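-- pv_equiv track=rewrite | github.com/tarkhog25/pychatbot-snoussi-berger | fonctions.py | list_word
-- ===== SOURCE A (Python) =====
-- def list_word(text):
--     """
--     function that takes the text of the question as a parameter, and returns the list of words that make up the question.
--     :param text: string that represents a sentence and more precisely in our case the question asked
--     :return: list of word that make up the sentence without any punctuation
--     """
--     liste = text.split()
--     new_liste = []
--     for word in liste:
--         # If the word is not a punctuation
--         if word not in "?!":
--             new_word = ""
--             for letter in word:
--                 # If there is separator like - or ' create 2 word ex: 'eux-meme' --> 'eux' and 'meme'
--                 if letter in "-'":
--                     new_liste.append(new_word)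
--                     new_word = ""
--                 # Delete all non letter character
--                 elif letter not in ",.":
--                     new_word += letter.lower()
--             new_liste.append(new_word)
--     return new_liste
-- ===== SOURCE B (Python) =====
-- def list_word(text):
--     new_liste = []
--     for word in text.split():
--         if word not in "?!":
--             cleaned = word.lower().replace(",", "").replace(".", "")
--             new_liste.extend(cleaned.replace("'", "-").split("-"))
--     return new_liste
-- ===== Notes on version B (the rewrite author's own statement) =====
-- stated objective: simpler
-- what changed: A's stateful per-character loop with a mutable current-word buffer flushed into the output is replaced by a per-word clean-then-split pipeline: lowercase the word, delete comma and period via str.replace, normalise the apostrophe to the hyphen, then str.split on the hyphen (an explicit separator keeps empty tokens at consecutive separators), extending the result list.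
import Mathlib
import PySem

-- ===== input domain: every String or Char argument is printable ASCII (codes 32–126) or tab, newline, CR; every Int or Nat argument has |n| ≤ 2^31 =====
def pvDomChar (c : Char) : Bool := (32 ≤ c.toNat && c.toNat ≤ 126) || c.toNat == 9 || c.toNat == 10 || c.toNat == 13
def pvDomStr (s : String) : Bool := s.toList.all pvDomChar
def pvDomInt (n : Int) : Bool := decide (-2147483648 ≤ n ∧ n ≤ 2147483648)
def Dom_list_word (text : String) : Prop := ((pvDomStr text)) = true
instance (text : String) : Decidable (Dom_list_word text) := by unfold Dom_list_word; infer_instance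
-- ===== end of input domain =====

-- B replaces A's stateful per-character buffer-and-flush loop by a per-word clean-then-split
-- pipeline (lowercase, strip ','/'.', then split on the separators), a simpler decomposition.

-- ===== PORT A =====
-- inner loop body of A; `letter in "-'"` / `letter not in ",."` on a single char is a membership test
def pvInnerStep (st : List String × List Char) (letter : Char) : List String × List Char :=
  if letter = '-' || letter = '\'' then (st.1 ++ [String.ofList st.2], [])
  else if !(letter = ',' || letter = '.') then (st.1, st.2 ++ [PySem.Chars.lowerChar letter])
  else st

-- body of A's `for word in liste` loop; `word not in "?!"` is a substring test
def pvAWordStep (new_liste : List String) (word : String) : List String :=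
  if !(PySem.Str.isIn word "?!") then
    let p := word.toList.foldl pvInnerStep (new_liste, ([] : List Char))
    p.1 ++ [String.ofList p.2]
  else new_liste

def list_word (text : String) : List String :=
  (PySem.Str.split₀ text).foldl pvAWordStep []

-- ===== PORT B =====
-- Source B's loop body: lower, delete ','/'.',  then `.replace("'","-").split("-")`
-- (splitOn is the Chars form of str.split with a nonempty separator)
def list_word_alt (text : String) : List String :=
  (PySem.Str.split₀ text).foldl
    (fun new_liste word =>
      if !(PySem.Str.isIn word "?!") then
        let cleaned := PySem.Str.replace (PySem.Str.replace (PySem.Str.lower word) "," "") "." ""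
        new_liste ++ (PySem.Chars.splitOn (PySem.Str.replace cleaned "'" "-").toList ['-']).map String.ofList
      else new_liste) []

-- ===== PRECONDITION & SPEC =====
def Spec_list_word (text : String) (out : List String) : Prop := out = list_word_alt text
instance (text : String) (out : List String) : Decidable (Spec_list_word text out) := by unfold Spec_list_word; infer_instance

-- ===== CLAIM =====
def Claim_equal_list_word : Prop := ∀ (text : String), Dom_list_word text → Spec_list_word text (list_word text)

-- ===== LEMMAS AND PROOFS =====

-- reference per-word tokenisation: front-to-back pieces built by a foldr
def pvPiecesStep (c : Char) (pieces : List (List Char)) : List (List Char) :=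
  if c = '-' || c = '\'' then [] :: pieces
  else if !(c = ',' || c = '.') then
    match pieces with
    | [] => [[PySem.Chars.lowerChar c]]   -- unreachable: pieces starts nonempty and stays nonempty
    | h :: t => (PySem.Chars.lowerChar c :: h) :: t
  else pieces

theorem pvPiecesStep_ne_nil (c : Char) (ps : List (List Char)) (h : ps ≠ []) :
    pvPiecesStep c ps ≠ [] := by
  unfold pvPiecesStep
  cases ps with
  | nil => exact absurd rfl h
  | cons a t => split_ifs <;> simp

theorem pvFoldr_ne_nil (cs : List Char) : cs.foldr pvPiecesStep [[]] ≠ [] := by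
  induction cs with
  | nil => simp
  | cons c cs ih => exact pvPiecesStep_ne_nil c _ ih

-- prepend `cur` onto the first piece (what A's pending buffer amounts to)
def pvGlue (cur : List Char) (ps : List (List Char)) : List (List Char) :=
  match ps with
  | [] => [cur]
  | h :: t => (cur ++ h) :: t

-- ---- A's inner loop equals the reference foldr ----
theorem pvInner_eq (cs : List Char) : ∀ (acc : List String) (cur : List Char),
    (cs.foldl pvInnerStep (acc, cur)).1 ++ [String.ofList (cs.foldl pvInnerStep (acc, cur)).2]
      = acc ++ (pvGlue cur (cs.foldr pvPiecesStep [[]])).map String.ofList := by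
  induction cs with
  | nil => intro acc cur; simp [pvGlue]
  | cons c cs ih =>
    intro acc cur
    by_cases hsep : c = '-' ∨ c = '\''
    · have h1 : pvInnerStep (acc, cur) c = (acc ++ [String.ofList cur], []) := by
        unfold pvInnerStep; rcases hsep with h | h <;> simp [h]
      have h2 : pvPiecesStep c (cs.foldr pvPiecesStep [[]]) = [] :: cs.foldr pvPiecesStep [[]] := by
        unfold pvPiecesStep; rcases hsep with h | h <;> simp [h]
      simp only [List.foldl_cons, List.foldr_cons, h1, h2, ih]
      cases hps : cs.foldr pvPiecesStep [[]] with
      | nil => exact absurd hps (pvFoldr_ne_nil cs)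
      | cons h t => simp [pvGlue]
    · push Not at hsep
      by_cases hpunct : c = ',' ∨ c = '.'
      · have h1 : pvInnerStep (acc, cur) c = (acc, cur) := by
          unfold pvInnerStep; rcases hpunct with h | h <;> simp [h]
        have h2 : pvPiecesStep c (cs.foldr pvPiecesStep [[]]) = cs.foldr pvPiecesStep [[]] := by
          unfold pvPiecesStep; rcases hpunct with h | h <;> simp [h]
        simp only [List.foldl_cons, List.foldr_cons, h1, h2, ih]
      · push Not at hpunct
        have h1 : pvInnerStep (acc, cur) c = (acc, cur ++ [PySem.Chars.lowerChar c]) := by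
          unfold pvInnerStep; simp [hsep.1, hsep.2, hpunct.1, hpunct.2]
        cases hps : cs.foldr pvPiecesStep [[]] with
        | nil => exact absurd hps (pvFoldr_ne_nil cs)
        | cons h t =>
          have h2 : pvPiecesStep c (h :: t) = (PySem.Chars.lowerChar c :: h) :: t := by
            unfold pvPiecesStep; simp [hsep.1, hsep.2, hpunct.1, hpunct.2]
          simp only [List.foldl_cons, List.foldr_cons, h1, hps, h2, ih]
          simp [pvGlue]

theorem pvWord_eq (word : String) (acc : List String) :
    (word.toList.foldl pvInnerStep (acc, ([] : List Char))).1
        ++ [String.ofList (word.toList.foldl pvInnerStep (acc, ([] : List Char))).2]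
      = acc ++ (word.toList.foldr pvPiecesStep [[]]).map String.ofList := by
  rw [pvInner_eq]
  cases hps : word.toList.foldr pvPiecesStep [[]] with
  | nil => exact absurd hps (pvFoldr_ne_nil _)
  | cons h t => simp [pvGlue]

-- ---- B's clean-then-split equals the reference foldr ----
-- replace with a one-character `old` is a flatMap
theorem pvReplaceGo_single (a : Char) (new : List Char) :
    ∀ (l : List Char) (fuel : Nat) (acc : List Char), l.length ≤ fuel →
    PySem.Chars.replace.go [a] new fuel l acc
      = acc.reverse ++ l.flatMap (fun c => if c = a then new else [c]) := by
  intro l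
  induction l with
  | nil => intro fuel acc _; cases fuel <;> simp [PySem.Chars.replace.go]
  | cons c t ih =>
    intro fuel acc hf
    cases fuel with
    | zero => simp at hf
    | succ f =>
      simp only [List.length_cons, Nat.succ_le_succ_iff] at hf
      by_cases h : c = a
      · have hpre : ([a]).isPrefixOf (c :: t) = true := by simp [h, List.isPrefixOf]
        simp [PySem.Chars.replace.go, ih f (new.reverse ++ acc) hf, h]
      · have hpre : ([a]).isPrefixOf (c :: t) = false := by
          simp [List.isPrefixOf]; exact fun hc => absurd hc.symm h
        simp [PySem.Chars.replace.go, hpre, ih f (c :: acc) hf, h]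

theorem pvReplace_single (a : Char) (new l : List Char) :
    PySem.Chars.replace l [a] new = l.flatMap (fun c => if c = a then new else [c]) := by
  simp [PySem.Chars.replace, pvReplaceGo_single a new l l.length [] (Nat.le_refl _)]

-- split on the single character '-' as a foldr
def pvSplitStep (c : Char) (ps : List (List Char)) : List (List Char) :=
  if c = '-' then [] :: ps
  else match ps with
  | [] => [[c]]
  | h :: t => (c :: h) :: t

theorem pvSplitStep_ne_nil (c : Char) (ps : List (List Char)) : pvSplitStep c ps ≠ [] := by
  unfold pvSplitStep; cases ps <;> split_ifs <;> simp

theorem pvSplitFoldr_ne_nil (cs : List Char) : cs.foldr pvSplitStep [[]] ≠ [] := by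
  induction cs with
  | nil => simp
  | cons c cs _ => exact pvSplitStep_ne_nil c _

theorem pvSplitGo (l : List Char) : ∀ (fuel : Nat) (cur : List Char) (acc : List (List Char)),
    l.length ≤ fuel →
    PySem.Chars.splitOn.go ['-'] fuel l cur acc
      = acc.reverse ++ pvGlue cur.reverse (l.foldr pvSplitStep [[]]) := by
  induction l with
  | nil => intro fuel cur acc _; cases fuel <;> simp [PySem.Chars.splitOn.go, pvGlue]
  | cons c t ih =>
    intro fuel cur acc hf
    cases fuel with
    | zero => simp at hf
    | succ f =>
      simp only [List.length_cons, Nat.succ_le_succ_iff] at hf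
      by_cases h : c = '-'
      · have hpre : (['-']).isPrefixOf (c :: t) = true := by simp [h, List.isPrefixOf]
        simp only [PySem.Chars.splitOn.go, hpre, if_true]
        rw [show List.drop (['-'].length) (c :: t) = t by simp]
        rw [ih f [] _ hf]
        simp only [List.foldr_cons, pvSplitStep, h, if_true]
        cases hps : t.foldr pvSplitStep [[]] with
        | nil => exact absurd hps (pvSplitFoldr_ne_nil t)
        | cons a u => simp [pvGlue]
      · have hpre : (['-']).isPrefixOf (c :: t) = false := by
          simp [List.isPrefixOf]; exact fun hc => absurd hc.symm h
        simp only [PySem.Chars.splitOn.go, hpre, Bool.false_eq_true, if_false]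
        rw [ih f (c :: cur) acc hf]
        simp only [List.foldr_cons, pvSplitStep, h]
        cases hps : t.foldr pvSplitStep [[]] with
        | nil => exact absurd hps (pvSplitFoldr_ne_nil t)
        | cons a u => simp [pvGlue]

theorem pvSplitOn_single (l : List Char) :
    PySem.Chars.splitOn l ['-'] = l.foldr pvSplitStep [[]] := by
  rw [PySem.Chars.splitOn, pvSplitGo l (l.length + 1) [] [] (Nat.le_succ _)]
  cases hps : l.foldr pvSplitStep [[]] with
  | nil => exact absurd hps (pvSplitFoldr_ne_nil l)
  | cons a u => simp [pvGlue]

theorem pvToNat_ofNat (n : Nat) (h : n.isValidChar) : (Char.ofNat n).toNat = n := by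
  simp [Char.ofNat, h, Char.ofNatAux, Char.toNat]

-- lowerChar only moves letters: it equals a non-letter x iff the input is x
theorem pvLowerChar_eq_iff (c x : Char) (hx : x.toNat < 65) :
    PySem.Chars.lowerChar c = x ↔ c = x := by
  unfold PySem.Chars.lowerChar PySem.Chars.isupper
  split_ifs with h
  · simp only [Bool.and_eq_true, decide_eq_true_eq] at h
    have h1 : 65 ≤ c.toNat := h.1
    have h2 : c.toNat ≤ 90 := h.2
    have hv : (c.toNat + 32).isValidChar := Or.inl (by omega)
    have ht : (Char.ofNat (c.toNat + 32)).toNat = c.toNat + 32 := pvToNat_ofNat _ hv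
    constructor
    · intro he
      have : (Char.ofNat (c.toNat + 32)).toNat = x.toNat := by rw [he]
      omega
    · intro he
      exfalso
      have : c.toNat = x.toNat := by rw [he]
      omega
  · exact Iff.rfl

-- the clean pipeline followed by the split-foldr is the reference foldr
theorem pvPipeline (cs : List Char) :
    (((((cs.map PySem.Chars.lowerChar).flatMap
          (fun c => if c = ',' then [] else [c])).flatMap
          (fun c => if c = '.' then [] else [c])).flatMap
          (fun c => if c = '\'' then ['-'] else [c])).foldr pvSplitStep [[]])
      = cs.foldr pvPiecesStep [[]] := by
  induction cs with
  | nil => simp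
  | cons c cs ih =>
    simp only [List.map_cons, List.flatMap_cons, List.foldr_cons]
    by_cases hc : c = ','
    · subst hc
      simp [show PySem.Chars.lowerChar ',' = ',' from by decide, ih, pvPiecesStep]
    · have hc' : PySem.Chars.lowerChar c ≠ ',' :=
        fun h => hc ((pvLowerChar_eq_iff c ',' (by decide)).mp h)
      by_cases hd : c = '.'
      · subst hd
        simp [show PySem.Chars.lowerChar '.' = '.' from by decide, ih, pvPiecesStep]
      · have hd' : PySem.Chars.lowerChar c ≠ '.' :=
          fun h => hd ((pvLowerChar_eq_iff c '.' (by decide)).mp h)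
        by_cases hq : c = '\''
        · subst hq
          simp [show PySem.Chars.lowerChar '\'' = '\'' from by decide, ih, pvSplitStep, pvPiecesStep]
        · have hq' : PySem.Chars.lowerChar c ≠ '\'' :=
            fun h => hq ((pvLowerChar_eq_iff c '\'' (by decide)).mp h)
          by_cases hm : c = '-'
          · subst hm
            simp [show PySem.Chars.lowerChar '-' = '-' from by decide, ih, pvSplitStep, pvPiecesStep]
          · have hm' : PySem.Chars.lowerChar c ≠ '-' :=
              fun h => hm ((pvLowerChar_eq_iff c '-' (by decide)).mp h)
            simp only [if_neg hc', List.singleton_append, List.flatMap_cons,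
              if_neg hd', List.singleton_append, List.flatMap_cons, if_neg hq',
              List.singleton_append, List.foldr_cons, ih]
            unfold pvSplitStep pvPiecesStep
            rw [if_neg hm']
            cases hps : cs.foldr pvPiecesStep [[]] with
            | nil => exact absurd hps (pvFoldr_ne_nil cs)
            | cons h t => simp [hm, hq, hc, hd]

-- B's per-word tokens in reference form
theorem pvBWord_eq (cs : List Char) :
    (PySem.Chars.splitOn
        (PySem.Chars.replace
          (PySem.Chars.replace (PySem.Chars.replace (PySem.Chars.lower cs) [','] []) ['.'] [])
          ['\''] ['-']) ['-']).map String.ofList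
      = (cs.foldr pvPiecesStep [[]]).map String.ofList := by
  simp only [PySem.Chars.lower, pvReplace_single]
  rw [pvSplitOn_single, pvPipeline]

-- ===== VERDICT =====
theorem list_word_spec : Claim_equal_list_word := by
  intro text _
  unfold Spec_list_word list_word list_word_alt
  congr 1
  funext acc w
  simp only [pvAWordStep, PySem.Str.isIn_eq, PySem.Str.toList_replace, PySem.Str.toList_lower]
  rw [show "?!".toList = ['?', '!'] from rfl, show ",".toList = [','] from rfl,
      show ".".toList = ['.'] from rfl, show "'".toList = ['\''] from rfl,
      show "-".toList = ['-'] from rfl, show "".toList = ([] : List Char) from rfl]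
  by_cases h : PySem.Chars.isIn w.toList ['?', '!']
  · simp [h]
  · rw [Bool.not_eq_true] at h
    rw [h]
    split_ifs
    · rw [pvWord_eq, pvBWord_eq]
    · rfl
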